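-- pv_equiv track=rewrite | github.com/offbookacting/OffBook-App | app/tabs/edit_tab.py | _plain_text_to_rtf
-- ===== SOURCE A (Python) =====
-- def _plain_text_to_rtf(plain_text: str) -> str:
--     """Convert plain text to RTF format, preserving all formatting for dialogue recognition."""
--     # Escape special RTF characters first
--     rtf_text = plain_text.replace('\\', '\\\\')
--     rtf_text = rtf_text.replace('{', '\\{')
--     rtf_text = rtf_text.replace('}', '\\}')
--
--     # Preserve all line breaks and whitespace exactly as they are
--     # Convert line breaks to RTF paragraph breaks, preserving multiple consecutive breaks
--     lines = rtf_text.split('\n')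
--     rtf_lines = []
--     for line in lines:
--         # Preserve the line content exactly (including leading/trailing whitespace)
--         # Convert tabs to RTF tab command
--         line = line.replace('\t', '\\tab ')
--         rtf_lines.append(line)
--
--     # Join with paragraph breaks, preserving empty lines
--     rtf_content = '\\par\n'.join(rtf_lines)
--
--     # RTF header with basic formatting (Courier Prime for monospace, matching script format)
--     rtf_header = "{\\rtf1\\ansi\\deff0 {\\fonttbl {\\f0 Courier Prime;}}\\f0\\fs24 "
--     rtf_footer = "}"
--
--     return rtf_header + rtf_content + rtf_footer
-- ===== SOURCE B (Python) =====
-- def _plain_text_to_rtf(plain_text: str) -> str: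
--     """Convert plain text to RTF format, preserving all formatting for dialogue recognition."""
--     table = {
--         '\\': '\\\\',
--         '{': '\\{',
--         '}': '\\}',
--         '\t': '\\tab ',
--         '\n': '\\par\n',
--     }
--     rtf_content = ''.join(table.get(c, c) for c in plain_text)
--     rtf_header = "{\\rtf1\\ansi\\deff0 {\\fonttbl {\\f0 Courier Prime;}}\\f0\\fs24 "
--     rtf_footer = "}"
--     return rtf_header + rtf_content + rtf_footer
-- ===== Notes on version B (the rewrite author's own statement) =====
-- stated objective: idiomatic
-- what changed: Replaced A's three whole-string replace scans plus split/per-line-replace/join with a single character-level pass over the text driven by a translation table mapping each special character to its RTF escape.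
import Mathlib
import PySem

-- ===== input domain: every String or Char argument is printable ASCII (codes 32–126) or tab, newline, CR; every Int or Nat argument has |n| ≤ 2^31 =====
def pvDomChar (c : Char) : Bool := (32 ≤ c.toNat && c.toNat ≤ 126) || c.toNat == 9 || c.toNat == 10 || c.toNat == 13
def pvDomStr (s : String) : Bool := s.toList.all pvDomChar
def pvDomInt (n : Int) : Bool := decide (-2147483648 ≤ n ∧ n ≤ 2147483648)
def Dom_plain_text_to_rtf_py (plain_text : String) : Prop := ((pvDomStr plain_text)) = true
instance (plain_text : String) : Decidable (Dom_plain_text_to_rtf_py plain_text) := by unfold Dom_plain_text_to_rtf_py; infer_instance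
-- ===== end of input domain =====

-- B replaces A's three whole-string replace scans + split/per-line-replace/join with one
-- character-level pass driven by a translation table (same output; objective: idiomatic).

-- ===== PORT A =====
def plain_text_to_rtf_py (plain_text : String) : String :=
  let rtf1 := PySem.Str.replace plain_text "\\" "\\\\"
  let rtf2 := PySem.Str.replace rtf1 "{" "\\{"
  let rtf3 := PySem.Str.replace rtf2 "}" "\\}"
  -- lines = rtf_text.split('\n')  ('\n' is a nonempty separator, so Python's split is Chars.splitOn; exact)
  let lines : List String := (PySem.Chars.splitOn rtf3.toList "\n".toList).map String.ofList
  let rtf_lines : List String :=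
    lines.foldl (fun acc line => acc ++ [PySem.Str.replace line "\t" "\\tab "]) []
  let rtf_content := PySem.Str.join "\\par\n" rtf_lines
  "{\\rtf1\\ansi\\deff0 {\\fonttbl {\\f0 Courier Prime;}}\\f0\\fs24 " ++ rtf_content ++ "}"

-- ===== PORT B =====
def rtfTable : PySem.Dict Char String :=
  ⟨[('\\', "\\\\"), ('{', "\\{"), ('}', "\\}"), ('\t', "\\tab "), ('\n', "\\par\n")]⟩

def plain_text_to_rtf_py_alt (plain_text : String) : String :=
  let rtf_content :=
    PySem.Str.join "" (plain_text.toList.map (fun c => PySem.Dict.getD rtfTable c (String.ofList [c])))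
  "{\\rtf1\\ansi\\deff0 {\\fonttbl {\\f0 Courier Prime;}}\\f0\\fs24 " ++ rtf_content ++ "}"

-- ===== PRECONDITION & SPEC =====
def Spec_plain_text_to_rtf_py (plain_text : String) (out : String) : Prop := out = plain_text_to_rtf_py_alt plain_text
instance (plain_text : String) (out : String) : Decidable (Spec_plain_text_to_rtf_py plain_text out) := by unfold Spec_plain_text_to_rtf_py; infer_instance

-- ===== CLAIM (what is proved, stated in full; the proofs are below) =====
def Claim_equal_plain_text_to_rtf_py : Prop := ∀ (plain_text : String), Dom_plain_text_to_rtf_py plain_text → Spec_plain_text_to_rtf_py plain_text (plain_text_to_rtf_py plain_text)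

-- ===== LEMMAS AND PROOFS =====

-- one-char substitution (what replacing a single-character needle does per character)
def pvSubst (o : Char) (new : List Char) (c : Char) : List Char := if c = o then new else [c]

-- structural version of splitting on a single character
def pvSplit (p : Char) : List Char → List (List Char)
  | [] => [[]]
  | c :: t => if c = p then [] :: pvSplit p t else (pvSplit p t).modifyHead (c :: ·)

-- the per-character escape that the whole pipeline amounts to
def pvEsc (c : Char) : List Char :=
  if c = '\\' then ['\\', '\\']
  else if c = '{' then ['\\', '{']
  else if c = '}' then ['\\', '}']
  else if c = '\t' then "\\tab ".toList
  else if c = '\n' then "\\par\n".toList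
  else [c]

theorem pv_replace_go_single (o : Char) (new : List Char) :
    ∀ (l : List Char) (fuel : Nat) (acc : List Char), l.length ≤ fuel →
      PySem.Chars.replace.go [o] new fuel l acc = acc.reverse ++ l.flatMap (pvSubst o new) := by
  intro l
  induction l with
  | nil =>
    intro fuel acc _
    cases fuel <;> simp [PySem.Chars.replace.go]
  | cons c t ih =>
    intro fuel acc hle
    cases fuel with
    | zero => simp at hle
    | succ f =>
      simp only [PySem.Chars.replace.go]
      by_cases h : c = o
      · subst h
        simp [List.isPrefixOf, ih f (new.reverse ++ acc) (by simpa using hle), pvSubst]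
      · have hb : (([o] : List Char).isPrefixOf (c :: t)) = false := by
          simp [List.isPrefixOf]
          exact fun hh => absurd hh.symm h
        simp [hb, ih f (c :: acc) (by simpa using hle), pvSubst, h]

theorem pv_replace_single (cs : List Char) (o : Char) (new : List Char) :
    PySem.Chars.replace cs [o] new = cs.flatMap (pvSubst o new) := by
  simpa [PySem.Chars.replace] using pv_replace_go_single o new cs cs.length [] le_rfl

theorem pv_modifyHead_id {α : Type} (xs : List α) : xs.modifyHead (fun x => x) = xs := by
  cases xs <;> rfl

theorem pv_modifyHead_modifyHead {α : Type} (f g : α → α) (xs : List α) :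
    (xs.modifyHead g).modifyHead f = xs.modifyHead (fun x => f (g x)) := by
  cases xs <;> rfl

theorem pv_split_go_single (p : Char) :
    ∀ (l : List Char) (fuel : Nat) (cur : List Char) (acc : List (List Char)), l.length ≤ fuel →
      PySem.Chars.splitOn.go [p] fuel l cur acc =
        acc.reverse ++ (pvSplit p l).modifyHead (cur.reverse ++ ·) := by
  intro l
  induction l with
  | nil =>
    intro fuel cur acc _
    cases fuel <;> simp [PySem.Chars.splitOn.go, pvSplit]
  | cons c t ih =>
    intro fuel cur acc hle
    cases fuel with
    | zero => simp at hle
    | succ f =>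
      simp only [PySem.Chars.splitOn.go]
      by_cases h : c = p
      · subst h
        have := ih f [] (cur.reverse :: acc) (by simpa using hle)
        simp only [List.isPrefixOf, BEq.refl, Bool.true_and] at this ⊢
        simp [this, pvSplit, pv_modifyHead_id]
      · have hb : (([p] : List Char).isPrefixOf (c :: t)) = false := by
          simp [List.isPrefixOf]
          exact fun hh => absurd hh.symm h
        have := ih f (c :: cur) acc (by simpa using hle)
        simp only [hb, Bool.false_eq_true, if_false, this, pvSplit, h, if_false]
        rw [pv_modifyHead_modifyHead]
        simp

theorem pv_splitOn_single (cs : List Char) (p : Char) :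
    PySem.Chars.splitOn cs [p] = pvSplit p cs := by
  have := pv_split_go_single p cs (cs.length + 1) [] [] (by omega)
  simpa [PySem.Chars.splitOn, pv_modifyHead_id] using this

theorem pv_pvSplit_ne_nil (p : Char) (cs : List Char) : pvSplit p cs ≠ [] := by
  induction cs with
  | nil => simp [pvSplit]
  | cons c t ih =>
    by_cases h : c = p
    · simp [pvSplit, h]
    · simp only [pvSplit, h, if_false]
      cases hx : pvSplit p t with
      | nil => exact absurd hx ih
      | cons a l => simp

theorem pv_intercalate_cons_ne_nil (sep a : List Char) (xs : List (List Char)) (hx : xs ≠ []) :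
    List.intercalate sep (a :: xs) = a ++ sep ++ List.intercalate sep xs := by
  cases xs with
  | nil => exact absurd rfl hx
  | cons b l => simp [List.intercalate, List.intersperse]

theorem pv_intercalate_modifyHead (sep pre : List Char) (xs : List (List Char)) (hx : xs ≠ []) :
    List.intercalate sep (xs.modifyHead (pre ++ ·)) = pre ++ List.intercalate sep xs := by
  cases xs with
  | nil => exact absurd rfl hx
  | cons a l =>
    cases l with
    | nil => simp [List.intercalate, List.intersperse]
    | cons b m => simp [List.intercalate, List.intersperse]

theorem pv_join_split (f : Char → List Char) (par : List Char) (p : Char) (cs : List Char) :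
    PySem.Chars.join par ((pvSplit p cs).map (fun l => l.flatMap f)) =
      cs.flatMap (fun c => if c = p then par else f c) := by
  induction cs with
  | nil => simp [pvSplit, PySem.Chars.join, List.intercalate]
  | cons c t ih =>
    by_cases h : c = p
    · subst h
      simp only [pvSplit, if_true, List.map_cons, PySem.Chars.join] at ih ⊢
      rw [pv_intercalate_cons_ne_nil _ _ _ (by simp [pv_pvSplit_ne_nil]), ih]
      simp
    · have hmap : ((pvSplit p t).modifyHead (c :: ·)).map (fun l => l.flatMap f) =
          ((pvSplit p t).map (fun l => l.flatMap f)).modifyHead (f c ++ ·) := by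
        cases hx : pvSplit p t with
        | nil => exact absurd hx (pv_pvSplit_ne_nil p t)
        | cons a l => simp
      simp only [pvSplit, h, if_false, List.flatMap_cons, PySem.Chars.join] at ih ⊢
      rw [hmap, pv_intercalate_modifyHead _ _ _ (by simp [pv_pvSplit_ne_nil]), ih]

theorem pv_esc_chain (c : Char) :
    (pvSubst '\\' ['\\', '\\'] c).flatMap
        (fun x => (pvSubst '{' ['\\', '{'] x).flatMap
          (fun x => (pvSubst '}' ['\\', '}'] x).flatMap
            (fun d => if d = '\n' then "\\par\n".toList else pvSubst '\t' "\\tab ".toList d))) = pvEsc c := by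
  by_cases h1 : c = '\\'; · subst h1; rfl
  by_cases h2 : c = '{'; · subst h2; rfl
  by_cases h3 : c = '}'; · subst h3; rfl
  by_cases h4 : c = '\t'; · subst h4; rfl
  by_cases h5 : c = '\n'; · subst h5; rfl
  simp [pvSubst, pvEsc, h1, h2, h3, h4, h5]

theorem pv_table_toList (c : Char) :
    (PySem.Dict.getD rtfTable c (String.ofList [c])).toList = pvEsc c := by
  by_cases h1 : c = '\\'; · subst h1; rfl
  by_cases h2 : c = '{'; · subst h2; rfl
  by_cases h3 : c = '}'; · subst h3; rfl
  by_cases h4 : c = '\t'; · subst h4; rfl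
  by_cases h5 : c = '\n'; · subst h5; rfl
  have h1' : (('\\' : Char) == c) = false := by simpa [BEq.comm] using (by simpa using h1 : ¬ c = '\\')
  have h2' : (('{' : Char) == c) = false := by simpa [BEq.comm] using (by simpa using h2 : ¬ c = '{')
  have h3' : (('}' : Char) == c) = false := by simpa [BEq.comm] using (by simpa using h3 : ¬ c = '}')
  have h4' : (('\t' : Char) == c) = false := by simpa [BEq.comm] using (by simpa using h4 : ¬ c = '\t')
  have h5' : (('\n' : Char) == c) = false := by simpa [BEq.comm] using (by simpa using h5 : ¬ c = '\n')
  simp [PySem.Dict.getD, PySem.Dict.get?, rtfTable, List.find?, h1', h2', h3', h4', h5', pvEsc,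
        h1, h2, h3, h4, h5]

theorem pv_intercalate_nil_flatten (l : List (List Char)) :
    List.intercalate ([] : List Char) l = l.flatten := by
  simp only [List.intercalate]
  induction l with
  | nil => rfl
  | cons a t ih => cases t <;> simp_all [List.intersperse]

theorem pv_content_eq (s : String) :
    PySem.Str.join "\\par\n"
      (((PySem.Chars.splitOn
            (PySem.Str.replace (PySem.Str.replace (PySem.Str.replace s "\\" "\\\\") "{" "\\{") "}"
              "\\}").toList
            "\n".toList).map
          String.ofList).foldl
        (fun acc line => acc ++ [PySem.Str.replace line "\t" "\\tab "]) [])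
    = PySem.Str.join "" (s.toList.map (fun c => PySem.Dict.getD rtfTable c (String.ofList [c]))) := by
  simp only [PySem.Str.join]
  apply congrArg String.ofList
  rw [PySem.List.foldl_append_singleton_eq_map]
  simp only [List.nil_append, List.map_map, Function.comp_def, PySem.Str.toList_replace,
    String.toList_ofList]
  have hn : ("\n" : String).toList = ['\n'] := rfl
  have hbs : ("\\" : String).toList = ['\\'] := rfl
  have hbs2 : ("\\\\" : String).toList = ['\\', '\\'] := rfl
  have hlb : ("{" : String).toList = ['{'] := rfl
  have hlb2 : ("\\{" : String).toList = ['\\', '{'] := rfl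
  have hrb : ("}" : String).toList = ['}'] := rfl
  have hrb2 : ("\\}" : String).toList = ['\\', '}'] := rfl
  have ht : ("\t" : String).toList = ['\t'] := rfl
  rw [hn, hbs, hbs2, hlb, hlb2, hrb, hrb2, ht]
  rw [pv_replace_single, pv_replace_single, pv_replace_single, pv_splitOn_single]
  simp only [pv_replace_single]
  rw [pv_join_split (pvSubst '\t' ("\\tab ").toList) (("\\par\n") : String).toList '\n']
  simp only [List.flatMap_assoc]
  simp only [pv_esc_chain]
  -- right-hand side
  simp only [pv_table_toList]
  have : PySem.Chars.join ("" : String).toList (s.toList.map pvEsc) = (s.toList.map pvEsc).flatten := by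
    simpa [PySem.Chars.join] using pv_intercalate_nil_flatten (s.toList.map pvEsc)
  rw [this, ← List.flatMap_def]

-- ===== VERDICT (by name: the statement is the Claim_ definition above) =====
theorem plain_text_to_rtf_py_spec : Claim_equal_plain_text_to_rtf_py := by
  intro s _
  unfold Spec_plain_text_to_rtf_py
  simp only [plain_text_to_rtf_py, plain_text_to_rtf_py_alt]
  rw [pv_content_eq s]
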